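-- pv_equiv track=rewrite | github.com/enku/teamplayer | teamplayer/lib/__init__.py | list_iter
-- ===== SOURCE A (Python) =====
-- from typing import BinaryIO, Iterable, Optional, TypeVar, cast
--
-- _T = TypeVar("_T")
--
-- def list_iter(items: Iterable[_T], start: Optional[_T] = None) -> Iterable[_T]:
--     """Yield each item if items
--
--     If start is given and is a member of items, then the item fillowing that one is
--     yielded first, and subsequent items are yielded in round-robin fashion back up to
--     start. Otherwise items are yielded in the original order they are provided.
--     """
--     my_list = list(items)
--
--     if start is not None:
--         try:
--             index = my_list.index(start)
--             my_list = my_list[index + 1 :] + my_list[: index + 1]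
--         except ValueError:
--             pass
--
--     for item in my_list:
--         yield item
-- ===== SOURCE B (Python) =====
-- def list_iter(items, start=None):
--     my_list = list(items)
--     prefix = []
--     found = False
--     for item in my_list:
--         if found:
--             yield item
--         else:
--             prefix.append(item)
--             if start is not None and item == start:
--                 found = True
--     for item in prefix:
--         yield item
-- ===== Notes on version B (the rewrite author's own statement) =====
-- stated objective: alternative
-- what changed: Replaces the .index search plus two slices and a list concatenation by a single pass with a prefix buffer and a found flag: unmatched items are buffered, items after the first match are yielded directly, then the buffer is flushed.
import Mathlib
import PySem

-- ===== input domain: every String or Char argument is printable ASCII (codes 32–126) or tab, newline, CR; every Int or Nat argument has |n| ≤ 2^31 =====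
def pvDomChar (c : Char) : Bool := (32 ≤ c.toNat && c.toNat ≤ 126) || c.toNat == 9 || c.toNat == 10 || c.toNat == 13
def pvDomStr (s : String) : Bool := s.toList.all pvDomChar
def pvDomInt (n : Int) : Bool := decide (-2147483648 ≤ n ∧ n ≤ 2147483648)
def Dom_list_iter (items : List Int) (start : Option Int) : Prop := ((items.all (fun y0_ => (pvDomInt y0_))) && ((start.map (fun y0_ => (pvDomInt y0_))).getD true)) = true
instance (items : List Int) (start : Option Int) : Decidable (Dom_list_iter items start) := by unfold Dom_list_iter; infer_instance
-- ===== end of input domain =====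

-- B replaces A's .index search plus two slices by one pass with a prefix buffer and a found flag (same return value; both are generators in Python, compared as lists of yielded items).

-- ===== PORT A =====
def list_iter (items : List Int) (start : Option Int) : List Int :=
  -- my_list = list(items)
  let my_list := items
  match start with
  | none => my_list
  | some s =>
    -- try: index = my_list.index(start); rotate  except ValueError: pass
    match PySem.List.index? my_list s with
    | none => my_list
    | some index =>
        PySem.List.slice my_list (some ((index : Int) + 1)) none ++
        PySem.List.slice my_list none (some ((index : Int) + 1))

-- ===== PORT B =====
-- the for-loop of Source B: `pre` is the prefix buffer; once the flag flips (start found),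
-- the rest is yielded directly, then the buffered prefix.
def listIterAltLoop (start : Option Int) : List Int → List Int → List Int
  | [], pre => pre
  | item :: rest, pre =>
    if start = some item then rest ++ (pre ++ [item])
    else listIterAltLoop start rest (pre ++ [item])

def list_iter_alt (items : List Int) (start : Option Int) : List Int :=
  listIterAltLoop start items []

-- ===== PRECONDITION & SPEC =====
def Spec_list_iter (items : List Int) (start : Option Int) (out : List Int) : Prop := out = list_iter_alt items start
instance (items : List Int) (start : Option Int) (out : List Int) : Decidable (Spec_list_iter items start out) := by unfold Spec_list_iter; infer_instance

-- ===== CLAIM (what is proved, stated in full; the proofs are below) =====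
def Claim_equal_list_iter : Prop := ∀ (items : List Int) (start : Option Int), Dom_list_iter items start → Spec_list_iter items start (list_iter items start)

-- ===== LEMMAS AND PROOFS =====

theorem listIterAltLoop_none (items pre : List Int) :
    listIterAltLoop none items pre = pre ++ items := by
  induction items generalizing pre with
  | nil => simp [listIterAltLoop]
  | cons x xs ih => simp [listIterAltLoop, ih]

theorem listIterAltLoop_some (s : Int) (items pre : List Int) :
    listIterAltLoop (some s) items pre =
      match PySem.List.index? items s with
      | none => pre ++ items
      | some i => items.drop (i + 1) ++ (pre ++ items.take (i + 1)) := by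
  induction items generalizing pre with
  | nil => simp [listIterAltLoop, PySem.List.index?]
  | cons x xs ih =>
    by_cases hx : x = s
    · subst hx
      rw [PySem.List.index?_cons_self]
      simp [listIterAltLoop]
    · rw [PySem.List.index?_cons_of_ne xs hx]
      have hne : some s ≠ some x := by simpa using (Ne.symm hx)
      simp only [listIterAltLoop, if_neg hne, ih]
      cases h : PySem.List.index? xs s with
      | none => simp
      | some i => simp

theorem list_iter_spec : Claim_equal_list_iter := by
  intro items start _
  unfold Spec_list_iter list_iter list_iter_alt
  cases start with
  | none => rw [listIterAltLoop_none]; simp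
  | some s =>
    rw [listIterAltLoop_some]
    cases h : PySem.List.index? items s with
    | none =>
      rw [PySem.List.index?_eq_idxOf?] at h
      simp [h]
    | some i =>
      rw [PySem.List.index?_eq_idxOf?] at h
      have h1 : ((i : Int) + 1) = ((i + 1 : Nat) : Int) := by push_cast; ring
      simp only [PySem.List.index?_eq_idxOf?, h]
      rw [h1, PySem.List.slice_from_natCast, PySem.List.slice_to_natCast]
      simp
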